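-- pv_equiv track=rewrite | github.com/couasnonanais/ConsecutiveEvents | Calculate_distributions_events.py | keep_key_dict
-- ===== SOURCE A (Python) =====
-- def keep_key_dict(dict_result, key):
--     to_remove = []
--     for dict_key in dict_result.keys():
--         if key not in dict_key:
--             to_remove.append(dict_key)
--     for dict_key in to_remove:
--         dict_result.pop(dict_key)
--
--     return dict_result
-- ===== SOURCE B (Python) =====
-- def keep_key_dict(dict_result, key):
--     # Fixpoint deletion: repeatedly scan for the first offending key and delete
--     # it from the dict, restarting the scan, until no key lacking the substring
--     # remains.  Same dict object is mutated and returned.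
--     while True:
--         bad = next((k for k in dict_result if key not in k), None)
--         if bad is None:
--             return dict_result
--         del dict_result[bad]
-- ===== Notes on version B (the rewrite author's own statement) =====
-- stated objective: alternative
-- what changed: Replaces A's two staged passes (collect all offending keys, then pop each) with a restart-scan fixpoint loop that finds the first key lacking the substring, deletes it, and rescans from the start until none remains.
import Mathlib
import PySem

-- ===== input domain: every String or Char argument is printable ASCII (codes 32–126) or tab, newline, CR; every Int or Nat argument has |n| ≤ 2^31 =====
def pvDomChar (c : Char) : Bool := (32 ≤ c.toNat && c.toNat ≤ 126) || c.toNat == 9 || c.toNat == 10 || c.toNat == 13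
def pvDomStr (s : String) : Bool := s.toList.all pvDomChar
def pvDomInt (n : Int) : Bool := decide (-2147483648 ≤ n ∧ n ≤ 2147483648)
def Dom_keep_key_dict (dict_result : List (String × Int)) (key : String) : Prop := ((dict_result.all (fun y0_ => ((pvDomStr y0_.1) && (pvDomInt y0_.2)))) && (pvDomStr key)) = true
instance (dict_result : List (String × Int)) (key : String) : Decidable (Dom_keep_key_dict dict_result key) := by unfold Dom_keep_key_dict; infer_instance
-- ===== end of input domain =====

-- Both A and B mutate the dict in place and return the same object; the equivalence proved here is about the
-- returned mapping. B replaces A's staged collect-then-pop passes with a restart-scan fixpoint deletion loop.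

-- ===== PORT A =====
-- A: first pass collects the keys not containing `key`; second pass pops each collected key.
-- dict.pop(k) removes the entry with key k; on the association list this is the filter below (exact: a dict never holds two entries with equal keys).
def keep_key_dict (dict_result : List (String × Int)) (key : String) : List (String × Int) :=
  let to_remove : List String :=
    dict_result.foldl (fun acc p => if !(PySem.Str.isIn key p.1) then acc ++ [p.1] else acc) []
  to_remove.foldl (fun d k => d.filter (fun p => ¬ (p.1 = k))) dict_result

-- ===== PORT B =====
-- B: while True: bad = next((k for k in dict_result if key not in k), None);
--    if bad is None: return dict_result; del dict_result[bad]  -- then rescan from the start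
-- (fuel = length of the dict bounds the loop: each iteration deletes at least one entry)
def kkdLoop (fuel : Nat) (d : List (String × Int)) (key : String) : List (String × Int) :=
  match fuel with
  | 0 => d
  | fuel + 1 =>
    match d.find? (fun p => !(PySem.Str.isIn key p.1)) with
    | none => d
    | some bad => kkdLoop fuel (d.filter (fun p => !(p.1 == bad.1))) key

def keep_key_dict_alt (dict_result : List (String × Int)) (key : String) : List (String × Int) :=
  kkdLoop dict_result.length dict_result key

-- ===== PRECONDITION & SPEC =====
def Spec_keep_key_dict (dict_result : List (String × Int)) (key : String) (out : List (String × Int)) : Prop := out = keep_key_dict_alt dict_result key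
instance (dict_result : List (String × Int)) (key : String) (out : List (String × Int)) : Decidable (Spec_keep_key_dict dict_result key out) := by unfold Spec_keep_key_dict; infer_instance

-- ===== CLAIM (what is proved, stated in full; the proofs are below) =====
def Claim_equal_keep_key_dict : Prop := ∀ (dict_result : List (String × Int)) (key : String), Dom_keep_key_dict dict_result key → Spec_keep_key_dict dict_result key (keep_key_dict dict_result key)

-- ===== LEMMAS AND PROOFS =====

-- Folding A's pop over the collected keys = one filter dropping every entry whose key is in that list.
lemma foldl_filter_eq_filter_not_mem (rem : List String) (d : List (String × Int)) :
    rem.foldl (fun d k => d.filter (fun p => ¬ (p.1 = k))) d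
      = d.filter (fun p => ¬ p.1 ∈ rem) := by
  induction rem generalizing d with
  | nil => simp
  | cons k rest ih =>
      simp only [List.foldl_cons, ih, List.filter_filter]
      apply List.filter_congr
      intro p _
      simp [eq_comm]
      rw [Bool.and_comm]

-- B's fixpoint deletion loop computes the filter keeping the entries whose key contains `key`.
lemma kkdLoop_eq_filter (key : String) : ∀ (n : Nat) (d : List (String × Int)), d.length ≤ n →
    kkdLoop n d key = d.filter (fun p => PySem.Str.isIn key p.1) := by
  intro n
  induction n with
  | zero =>
      intro d hd
      have : d = [] := List.eq_nil_of_length_eq_zero (Nat.le_zero.mp hd)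
      subst this
      simp [kkdLoop]
  | succ n ih =>
      intro d hd
      rw [kkdLoop]
      split
      · rename_i h
        symm
        apply List.filter_eq_self.mpr
        intro p hp
        have := List.find?_eq_none.mp h p hp
        simpa using this
      · rename_i bad h
        have hbad : ¬ PySem.Str.isIn key bad.1 = true := by
          have := List.find?_some h
          simpa using this
        have hlt : (d.filter (fun p => !(p.1 == bad.1))).length < d.length := by
          apply List.length_filter_lt_length_iff_exists.mpr
          refine ⟨bad, List.mem_of_find?_eq_some h, ?_⟩
          simp
        rw [ih _ (Nat.le_of_lt_succ (Nat.lt_of_lt_of_le hlt hd)), List.filter_filter]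
        apply List.filter_congr
        intro p _
        by_cases hg : PySem.Str.isIn key p.1 = true
        · have hne : (p.1 == bad.1) = false :=
            beq_eq_false_iff_ne.mpr (fun e => hbad (e ▸ hg))
          simp only [hg, hne, Bool.not_false, Bool.and_true]
        · have hg' : PySem.Str.isIn key p.1 = false := Bool.eq_false_iff.mpr hg
          simp only [hg', Bool.false_and]

lemma alt_eq_filter (d : List (String × Int)) (key : String) :
    keep_key_dict_alt d key = d.filter (fun p => PySem.Str.isIn key p.1) :=
  kkdLoop_eq_filter key d.length d (Nat.le_refl _)

-- A's result is also that filter.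
lemma a_eq_filter (d : List (String × Int)) (key : String) :
    keep_key_dict d key = d.filter (fun p => PySem.Str.isIn key p.1) := by
  unfold keep_key_dict
  simp only [PySem.List.foldl_append_if, List.nil_append, foldl_filter_eq_filter_not_mem]
  apply List.filter_congr
  intro p hp
  by_cases h : PySem.Str.isIn key p.1
  · simp only [h, decide_eq_true_eq]
    simp only [List.mem_map, List.mem_filter, not_exists, not_and]
    rintro ⟨q, hqd⟩ ⟨_, hq⟩ hfst
    rw [hfst, h] at hq
    simp at hq
  · simp only [h]
    simp only [decide_eq_false_iff_not, not_not, List.mem_map]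
    exact ⟨p, List.mem_filter.mpr ⟨hp, by simpa using h⟩, rfl⟩

-- ===== VERDICT (by name: the statement is the Claim_ definition above) =====
theorem keep_key_dict_spec : Claim_equal_keep_key_dict := by
  intro d key _
  show keep_key_dict d key = keep_key_dict_alt d key
  rw [a_eq_filter, alt_eq_filter]
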